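-- pv_equiv track=rewrite | github.com/arunachalamev/PythonProgramming | Easy.py | P953_isAlienSorted
-- ===== SOURCE A (Python) =====
-- def P953_isAlienSorted(words,order):
--     ind = {c:i for i,c in enumerate(order)}
--     for a,b in zip(words,words[1:]):
--         if len(a) > len(b) and a[:len(b)] == b:
--             return False
--         for s1,s2 in zip(a,b):
--             if ind[s1] < ind[s2]:
--                 break
--             elif ind[s1] > ind[s2]:
--                 return False
--     return True
-- ===== SOURCE B (Python) =====
-- def P953_isAlienSorted(words, order):
--     # characters not in order rank after all known ones (A raises KeyError on them)
--     ind = {c: i for i, c in enumerate(order)}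
--     n = len(order)
--     keys = [[ind.get(c, n) for c in w] for w in words]
--     return keys == sorted(keys)
-- ===== Notes on version B (the rewrite author's own statement) =====
-- stated objective: simpler
-- what changed: B drops A's pairwise character scan with prefix special-case, break and early return entirely: it translates every word into its list of order-indices in one comprehension (unknown characters ranking after all known ones, where A raises KeyError) and returns keys == sorted(keys), letting the sort and Python's lexicographic list comparison decide sortedness; Pre_ excludes exactly the inputs where A's lazy scan raises KeyError (B returns a verdict there).
import Mathlib
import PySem

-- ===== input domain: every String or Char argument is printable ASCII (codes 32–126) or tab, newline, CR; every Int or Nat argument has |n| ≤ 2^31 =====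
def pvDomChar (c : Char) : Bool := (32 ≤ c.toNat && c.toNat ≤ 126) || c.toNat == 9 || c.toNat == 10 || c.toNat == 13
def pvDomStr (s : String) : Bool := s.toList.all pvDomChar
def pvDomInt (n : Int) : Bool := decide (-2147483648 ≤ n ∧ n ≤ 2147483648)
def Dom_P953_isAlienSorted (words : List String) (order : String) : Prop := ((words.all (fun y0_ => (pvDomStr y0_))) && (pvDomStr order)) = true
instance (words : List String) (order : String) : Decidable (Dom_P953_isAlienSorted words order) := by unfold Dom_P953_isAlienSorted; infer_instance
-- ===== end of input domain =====

-- B replaces A's pairwise character scan (prefix special-case, break, early return) by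
-- translating every word into its list of order-indices (unknown characters rank after all
-- known ones) and checking keys == sorted(keys) (objective: simpler; not claimed faster).

-- ===== PORT A =====
-- ind = {c: i for i, c in enumerate(order)}  (this comprehension appears verbatim in both Pythons)
def pvInd (order : String) : PySem.Dict Char Int :=
  (PySem.List.enumerate order.toList 0).foldl (fun d p => d.insert p.2 p.1) PySem.Dict.empty

-- inner 'for s1,s2 in zip(a,b)' loop: true = fell through or break (continue), false = 'return False'.
-- ind[s1] is ported as getD _ 0: the KeyError inputs are excluded by Pre_.
def pvInnerA (d : PySem.Dict Char Int) : List (Char × Char) → Bool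
  | [] => true
  | (s1, s2) :: rest =>
    if d.getD s1 0 < d.getD s2 0 then true
    else if d.getD s1 0 > d.getD s2 0 then false
    else pvInnerA d rest

-- outer 'for a,b in zip(words, words[1:])' loop; a[:len(b)] == b is take (len b) (exact: len b ≥ 0).
def pvLoopA (d : PySem.Dict Char Int) : List (String × String) → Bool
  | [] => true
  | (a, b) :: rest =>
    if a.toList.length > b.toList.length && (a.toList.take b.toList.length == b.toList) then false
    else if pvInnerA d (a.toList.zip b.toList) then pvLoopA d rest
    else false

def P953_isAlienSorted (words : List String) (order : String) : Bool :=
  pvLoopA (pvInd order) (words.zip words.tail)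

-- ===== PORT B =====
-- [ind.get(c, n) for c in w]  with n = len(order)
def pvKeyB (d : PySem.Dict Char Int) (n : Int) (w : String) : List Int :=
  w.toList.map (fun c => d.getD c n)

-- keys = [[ind.get(c, n) for c in w] for w in words]; return keys == sorted(keys)
-- (Python's list comparison is the lexicographic order; the Mathlib lexicographic
-- LinearOrder on List Int is passed explicitly, Lean would otherwise pick the
-- definitionally-equal core instance)
def P953_isAlienSorted_alt (words : List String) (order : String) : Bool :=
  let d := pvInd order
  let n : Int := (order.toList.length : Int)
  let keys := words.map (pvKeyB d n)
  keys == @PySem.List.sorted (List Int) (List Int) List.instLinearOrder.toLT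
    LinearOrder.toDecidableLT keys (fun x => x) false

-- ===== PRECONDITION & SPEC =====
-- index of the LAST occurrence of c in l (for c ∈ l this is the value {c:i for i,c in enumerate(l)}[c])
def pvLastIdx (l : List Char) (c : Char) : Nat := l.length - 1 - l.reverse.idxOf c

-- the pair hits A's prefix shortcut (returns False before any ind lookup)
def pvPfx (a b : List Char) : Bool :=
  decide (b.length < a.length) && (a.take b.length == b)

-- every character A's inner scan of this pair reads (both words, up to and including the
-- first differing position) is present in order
def pvReadsOk (ord a b : List Char) : Bool :=
  (List.range (min a.length b.length)).all fun j =>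
    !(a.take j == b.take j) || (ord.contains (a.getD j ' ') && ord.contains (b.getD j ' '))

-- the pair is decided False at its first differing position, from characters present in order
def pvScanF (ord a b : List Char) : Bool :=
  (List.range (min a.length b.length)).any fun j =>
    (a.take j == b.take j) && (a.getD j ' ' != b.getD j ' ') &&
    ord.contains (a.getD j ' ') && ord.contains (b.getD j ' ') &&
    decide (pvLastIdx ord (b.getD j ' ') < pvLastIdx ord (a.getD j ' '))

def pvSafe (ord : List Char) (p : String × String) : Bool :=
  pvPfx p.1.toList p.2.toList || pvReadsOk ord p.1.toList p.2.toList

def pvDecF (ord : List Char) (p : String × String) : Bool :=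
  pvPfx p.1.toList p.2.toList || pvScanF ord p.1.toList p.2.toList

-- Pre_ excludes exactly the inputs on which A raises KeyError: some adjacent pair, not
-- preceded by a pair already decided False (prefix rule or first-difference scan), makes
-- A's scan read a character missing from order.
def Pre_P953_isAlienSorted (words : List String) (order : String) : Prop :=
  ∀ k < (words.zip words.tail).length,
    pvSafe order.toList ((words.zip words.tail).getD k ("", "")) = true ∨
    ∃ i < k, pvDecF order.toList ((words.zip words.tail).getD i ("", "")) = true
instance (words : List String) (order : String) : Decidable (Pre_P953_isAlienSorted words order) := by
  unfold Pre_P953_isAlienSorted; infer_instance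

def pvWitness_P953_isAlienSorted : List String × String := (["ab", "ad", "b"], "abcd")

def Spec_P953_isAlienSorted (words : List String) (order : String) (out : Bool) : Prop :=
  out = P953_isAlienSorted_alt words order
instance (words : List String) (order : String) (out : Bool) : Decidable (Spec_P953_isAlienSorted words order out) := by
  unfold Spec_P953_isAlienSorted; infer_instance

-- ===== CLAIM (what is proved, stated in full; the proofs are below) =====
def Claim_equal_P953_isAlienSorted : Prop := ∀ (words : List String) (order : String), Dom_P953_isAlienSorted words order → Pre_P953_isAlienSorted words order → Spec_P953_isAlienSorted words order (P953_isAlienSorted words order)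

-- ===== LEMMAS AND PROOFS =====

-- A key never occurring in l falls through the enumerate-fold.
theorem pvFold_get?_notMem (l : List Char) (s : Int) (d0 : PySem.Dict Char Int) (c : Char)
    (h : c ∉ l) :
    ((PySem.List.enumerate l s).foldl (fun d p => d.insert p.2 p.1) d0).get? c = d0.get? c := by
  induction l generalizing s d0 with
  | nil => simp [PySem.List.enumerate_nil]
  | cons x xs ih =>
    rw [PySem.List.enumerate_cons, List.foldl_cons,
      ih (s + 1) _ (fun hm => h (List.mem_cons_of_mem _ hm)),
      PySem.Dict.get?_insert, if_neg (fun he => h (by rw [he]; exact List.mem_cons_self))]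

-- A key occurring in l maps to (start offset +) the index of its LAST occurrence.
theorem pvFold_get?_mem (l : List Char) (s : Int) (d0 : PySem.Dict Char Int) (c : Char)
    (h : c ∈ l) :
    ((PySem.List.enumerate l s).foldl (fun d p => d.insert p.2 p.1) d0).get? c
      = some (s + ((l.length - 1 - l.reverse.idxOf c : Nat) : Int)) := by
  induction l generalizing s d0 with
  | nil => simp at h
  | cons x xs ih =>
    rw [PySem.List.enumerate_cons, List.foldl_cons]
    by_cases hm : c ∈ xs
    · rw [ih (s + 1) _ hm]
      have hidx : (x :: xs).reverse.idxOf c = xs.reverse.idxOf c := by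
        rw [List.reverse_cons, List.idxOf_append_of_mem (List.mem_reverse.mpr hm)]
      have hb : xs.reverse.idxOf c < xs.length := by
        simpa using List.idxOf_lt_length_of_mem (List.mem_reverse.mpr hm)
      rw [hidx]
      congr 1
      simp only [List.length_cons]
      push_cast [Nat.sub_sub]
      omega
    · have hcx : c = x := by
        rcases List.mem_cons.mp h with h | h
        · exact h
        · exact absurd h hm
      subst hcx
      rw [pvFold_get?_notMem xs (s + 1) _ c hm, PySem.Dict.get?_insert_self]
      have hidx : (c :: xs).reverse.idxOf c = xs.length := by
        rw [List.reverse_cons, List.idxOf_append_of_notMem (fun hr => hm (List.mem_reverse.mp hr))]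
        simp
      rw [hidx]
      congr 1
      simp only [List.length_cons]
      have : xs.length + 1 - 1 - xs.length = 0 := by omega
      rw [this]
      simp

-- The value of ind at a character of order is the index of its last occurrence (any default).
theorem pvInd_getD_mem (order : String) (c : Char) (v : Int) (h : c ∈ order.toList) :
    (pvInd order).getD c v = ((pvLastIdx order.toList c : Nat) : Int) := by
  rw [PySem.Dict.getD_eq_get?_getD,
    show (pvInd order).get? c
        = some ((0 : Int) + ((order.toList.length - 1 - order.toList.reverse.idxOf c : Nat) : Int))
      from pvFold_get?_mem order.toList 0 PySem.Dict.empty c h]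
  simp [pvLastIdx]

-- The list element at the last-occurrence index is the character itself.
theorem pvLastIdx_getElem (l : List Char) (c : Char) (h : c ∈ l) :
    ∃ (hlt : pvLastIdx l c < l.length), l[pvLastIdx l c] = c := by
  have hr : c ∈ l.reverse := List.mem_reverse.mpr h
  have hk : l.reverse.idxOf c < l.length := by simpa using List.idxOf_lt_length_of_mem hr
  have hlt : pvLastIdx l c < l.length := by
    unfold pvLastIdx
    have : 0 < l.length := List.length_pos_of_mem h
    omega
  refine ⟨hlt, ?_⟩
  have hget : l.reverse[l.reverse.idxOf c]'(by simpa using hk) = c := List.getElem_idxOf (by simpa using hk)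
  rw [List.getElem_reverse] at hget
  simpa [pvLastIdx] using hget

-- Two distinct characters of order have distinct last-occurrence indices.
theorem pvLastIdx_inj (order : String) (c c' : Char)
    (hc : c ∈ order.toList) (hc' : c' ∈ order.toList)
    (h : pvLastIdx order.toList c = pvLastIdx order.toList c') : c = c' := by
  obtain ⟨h1, e1⟩ := pvLastIdx_getElem order.toList c hc
  obtain ⟨h2, e2⟩ := pvLastIdx_getElem order.toList c' hc'
  rw [← e1, ← e2]
  simp [h]

-- The lexicographic order on List Int (Mathlib's linear order, lt = List.Lex (· < ·)):
-- the cons/nil characterisations used below.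
theorem pvNil_le (l : List Int) : ([] : List Int) ≤ l := by
  rw [le_iff_lt_or_eq]
  cases l with
  | nil => exact Or.inr rfl
  | cons x xs => exact Or.inl (List.Lex.nil)

theorem pvNot_cons_le_nil (x : Int) (xs : List Int) : ¬ (x :: xs ≤ ([] : List Int)) := by
  intro h
  exact absurd (List.Lex.nil (r := (· < ·)) (a := x) (l := xs)) (not_lt_of_ge h)

theorem pvCons_le_cons (x y : Int) (xs ys : List Int) :
    (x :: xs ≤ y :: ys) ↔ (x < y ∨ (x = y ∧ xs ≤ ys)) := by
  rw [← not_lt, ← not_lt (a := ys)]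
  constructor
  · intro h
    rcases lt_trichotomy x y with hlt | heq | hgt
    · exact Or.inl hlt
    · exact Or.inr ⟨heq, fun hl => h (heq ▸ List.Lex.cons hl)⟩
    · exact absurd (List.Lex.rel hgt) h
  · rintro (hlt | ⟨rfl, hle⟩) h
    · cases h with
      | cons h' => exact absurd hlt (lt_irrefl x)
      | rel h' => exact absurd (hlt.trans h') (lt_irrefl x)
    · cases h with
      | cons h' => exact hle h'
      | rel h' => exact absurd h' (lt_irrefl x)

-- When b is a proper prefix of a, the mapped key of a is not ≤ the mapped key of b.
theorem pvNotLe_prefix (f : Char → Int) (b a : List Char)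
    (hlen : b.length < a.length) (htake : a.take b.length = b) :
    ¬ (a.map f ≤ b.map f) := by
  induction b generalizing a with
  | nil =>
    cases a with
    | nil => simp at hlen
    | cons x xs => exact pvNot_cons_le_nil _ _
  | cons y ys ih =>
    cases a with
    | nil => simp at hlen
    | cons x xs =>
      rw [List.length_cons, List.take_succ_cons] at htake
      obtain ⟨hxy, htk⟩ := List.cons.injEq .. ▸ htake
      subst hxy
      simp only [List.map_cons]
      rw [pvCons_le_cons]
      rintro (h | ⟨-, h⟩)
      · exact absurd h (lt_irrefl _)
      · exact ih xs (by simpa using hlen) htk h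

-- pvPfx and pvReadsOk shift over a shared head.
theorem pvPfx_cons (x : Char) (xs ys : List Char) :
    pvPfx (x :: xs) (x :: ys) = pvPfx xs ys := by
  simp [pvPfx]

theorem pvReadsOk_cons (ord : List Char) (x : Char) (xs ys : List Char) :
    pvReadsOk ord (x :: xs) (x :: ys)
      = (ord.contains x && pvReadsOk ord xs ys) := by
  unfold pvReadsOk
  rw [show min (x :: xs).length (x :: ys).length = min xs.length ys.length + 1 by
        simp [Nat.succ_min_succ],
    List.range_succ_eq_map, List.all_cons, List.all_map]
  congr 1
  · simp [Bool.and_self]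
  · congr 1
    funext j
    simp only [Function.comp_def, List.take_succ_cons, List.getD_cons_succ, List.cons_beq_cons,
      beq_self_eq_true, Bool.true_and]

-- The mapped keys of two lists sharing a head compare by dropping the head.
-- (equal characters have equal key values, present in order or not)

-- A's per-pair check is 'key a ≤ key b' on a safe pair.
theorem pvPair_safe (order : String) (n : Int) (a b : List Char)
    (hS : (pvPfx a b || pvReadsOk order.toList a b) = true) :
    ((if a.length > b.length && (a.take b.length == b) then false
      else pvInnerA (pvInd order) (a.zip b)) = true)
      ↔ (a.map (fun c => (pvInd order).getD c n) ≤ b.map (fun c => (pvInd order).getD c n)) := by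
  induction a generalizing b with
  | nil =>
    simp [pvInnerA, pvNil_le]
  | cons x xs ih =>
    cases b with
    | nil =>
      simp only [List.length_nil, List.take_zero, List.map_nil]
      rw [if_pos (by simp)]
      simp [pvNot_cons_le_nil]
    | cons y ys =>
      simp only [List.map_cons]
      by_cases hxy : x = y
      · subst hxy
        have hS' : (pvPfx xs ys || pvReadsOk order.toList xs ys) = true := by
          rcases Bool.or_eq_true_iff.mp hS with h | h
          · rw [pvPfx_cons] at h
            simp [h]
          · rw [pvReadsOk_cons] at h
            simp [Bool.and_eq_true_iff.mp h |>.2]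
        have hIH := ih ys hS'
        rw [pvCons_le_cons]
        simp only [lt_self_iff_false, false_or, true_and]
        rw [← hIH]
        simp only [List.zip_cons_cons, pvInnerA,
          List.length_cons, List.take_succ_cons, gt_iff_lt, Nat.add_lt_add_iff_right,
          List.cons_beq_cons, beq_self_eq_true, Bool.true_and, lt_self_iff_false, if_false]
      · -- heads differ: the prefix test fails, hS must come from pvReadsOk, position 0
        have hpfx : pvPfx (x :: xs) (y :: ys) = false := by
          apply Bool.and_eq_false_iff.mpr
          right
          apply beq_eq_false_iff_ne.mpr
          rw [List.length_cons, List.take_succ_cons]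
          intro he
          injection he with he1 _
          exact hxy he1
        have hro : pvReadsOk order.toList (x :: xs) (y :: ys) = true := by
          rcases Bool.or_eq_true_iff.mp hS with h | h
          · rw [hpfx] at h; exact absurd h (by simp)
          · exact h
        have h0 := List.all_eq_true.mp hro 0 (by
          refine List.mem_range.mpr ?_
          simp [Nat.succ_min_succ])
        simp only [List.take_zero, beq_self_eq_true, Bool.not_true, Bool.false_or,
          List.getD_cons_zero, Bool.and_eq_true, List.contains_iff_mem] at h0
        obtain ⟨hx, hy⟩ := h0
        have hne : pvLastIdx order.toList x ≠ pvLastIdx order.toList y :=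
          fun he => hxy (pvLastIdx_inj order x y hx hy he)
        have hvx0 := pvInd_getD_mem order x 0 hx
        have hvy0 := pvInd_getD_mem order y 0 hy
        have hvxn := pvInd_getD_mem order x n hx
        have hvyn := pvInd_getD_mem order y n hy
        have hcond : (decide ((x :: xs).length > (y :: ys).length)
            && (List.take (y :: ys).length (x :: xs) == y :: ys)) = false := by
          have := hpfx
          unfold pvPfx at this
          rcases Bool.and_eq_false_iff.mp this with h | h
          · simp only [List.length_cons]
            apply Bool.and_eq_false_iff.mpr
            left
            simpa using (by simpa using h : ¬ (y :: ys).length < (x :: xs).length)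
          · exact Bool.and_eq_false_iff.mpr (Or.inr h)
        rw [hcond]
        simp only [Bool.false_eq_true, if_false, List.zip_cons_cons]
        rw [pvCons_le_cons, hvxn, hvyn]
        have hnee : ¬ ((pvLastIdx order.toList x : Int) = (pvLastIdx order.toList y : Int)) := by
          exact_mod_cast fun he => hne (by exact_mod_cast he)
        rcases Nat.lt_or_ge (pvLastIdx order.toList x) (pvLastIdx order.toList y) with hlt | hge
        · have hlt' : (pvInd order).getD x 0 < (pvInd order).getD y 0 := by
            rw [hvx0, hvy0]; exact_mod_cast hlt
          rw [pvInnerA, if_pos hlt']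
          simp only [true_iff]
          exact Or.inl (by exact_mod_cast hlt)
        · have hgt : pvLastIdx order.toList y < pvLastIdx order.toList x := by
            rcases Nat.lt_or_ge (pvLastIdx order.toList y) (pvLastIdx order.toList x) with h | h
            · exact h
            · exact absurd (Nat.le_antisymm hge h).symm hne
          have hgt' : (pvInd order).getD x 0 > (pvInd order).getD y 0 := by
            rw [hvx0, hvy0]; exact_mod_cast hgt
          rw [pvInnerA, if_neg (by omega), if_pos hgt']
          simp only [Bool.false_eq_true, false_iff]
          rintro (h | ⟨h, -⟩)
          · have : pvLastIdx order.toList x < pvLastIdx order.toList y := by exact_mod_cast h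
            omega
          · exact hnee h

-- On a pair decided False by the first-difference scan, A's inner loop returns False and
-- the mapped keys compare strictly the other way.
theorem pvScan_false (order : String) (n : Int) (j : Nat) (a b : List Char)
    (hja : j < a.length) (hjb : j < b.length)
    (htake : a.take j = b.take j)
    (hne : a.getD j ' ' ≠ b.getD j ' ')
    (hx : a.getD j ' ' ∈ order.toList) (hy : b.getD j ' ' ∈ order.toList)
    (hlt : pvLastIdx order.toList (b.getD j ' ') < pvLastIdx order.toList (a.getD j ' ')) :
    pvInnerA (pvInd order) (a.zip b) = false
      ∧ ¬ (a.map (fun c => (pvInd order).getD c n) ≤ b.map (fun c => (pvInd order).getD c n)) := by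
  induction j generalizing a b with
  | zero =>
    cases a with
    | nil => simp at hja
    | cons x xs =>
      cases b with
      | nil => simp at hjb
      | cons y ys =>
        simp only [List.getD_cons_zero] at hne hlt hx hy
        have hgt0 : (pvInd order).getD y 0 < (pvInd order).getD x 0 := by
          rw [pvInd_getD_mem order x 0 hx, pvInd_getD_mem order y 0 hy]
          exact_mod_cast hlt
        constructor
        · rw [List.zip_cons_cons, pvInnerA, if_neg (by omega), if_pos hgt0]
        · simp only [List.map_cons]
          rw [pvCons_le_cons, pvInd_getD_mem order x n hx, pvInd_getD_mem order y n hy]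
          rintro (h | ⟨h, -⟩)
          · have : pvLastIdx order.toList x < pvLastIdx order.toList y := by exact_mod_cast h
            omega
          · have : pvLastIdx order.toList x = pvLastIdx order.toList y := by exact_mod_cast h
            omega
  | succ j ih =>
    cases a with
    | nil => simp at hja
    | cons x xs =>
      cases b with
      | nil => simp at hjb
      | cons y ys =>
        rw [List.take_succ_cons, List.take_succ_cons] at htake
        obtain ⟨hxy, htk⟩ := List.cons.injEq .. ▸ htake
        subst hxy
        simp only [List.getD_cons_succ] at hne hlt hx hy
        have hrec := ih xs ys (by simpa using hja) (by simpa using hjb) htk hne hx hy hlt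
        constructor
        · rw [List.zip_cons_cons, pvInnerA, if_neg (by omega), if_neg (by omega)]
          exact hrec.1
        · simp only [List.map_cons]
          rw [pvCons_le_cons]
          rintro (h | ⟨-, h⟩)
          · exact absurd h (lt_irrefl _)
          · exact hrec.2 h

-- On a pair satisfying pvDecF, A's pair check returns False and the keys are out of order.
theorem pvPair_decF (order : String) (n : Int) (a b : List Char)
    (hF : (pvPfx a b || pvScanF order.toList a b) = true) :
    (if a.length > b.length && (a.take b.length == b) then false
     else pvInnerA (pvInd order) (a.zip b)) = false
    ∧ ¬ (a.map (fun c => (pvInd order).getD c n) ≤ b.map (fun c => (pvInd order).getD c n)) := by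
  rcases Bool.or_eq_true_iff.mp hF with hp | hs
  · obtain ⟨hlen, htake⟩ := Bool.and_eq_true_iff.mp hp
    have hlen' : b.length < a.length := of_decide_eq_true hlen
    have htake' : a.take b.length = b := by simpa using htake
    constructor
    · rw [if_pos]
      rw [htake']
      simp only [beq_self_eq_true, Bool.and_true, decide_eq_true_eq]
      exact hlen'
    · exact pvNotLe_prefix _ b a hlen' htake'
  · obtain ⟨j, hjr, hj⟩ := List.any_eq_true.mp hs
    have hjm : j < min a.length b.length := List.mem_range.mp hjr
    simp only [Bool.and_eq_true, beq_iff_eq, bne_iff_ne, List.contains_iff_mem,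
      decide_eq_true_eq] at hj
    obtain ⟨⟨⟨⟨htake, hne⟩, hx⟩, hy⟩, hlt⟩ := hj
    have hsc := pvScan_false order n j a b (by omega) (by omega) htake hne hx hy hlt
    refine ⟨?_, hsc.2⟩
    split_ifs with h1
    · rfl
    · exact hsc.1

-- The sequential safety invariant of A's outer loop, in recursive form.
def pvPreP (ord : List Char) : List (String × String) → Prop
  | [] => True
  | p :: ps => pvSafe ord p = true ∧ (pvDecF ord p = true ∨ pvPreP ord ps)

-- The indexed precondition is the recursive invariant.
theorem pvPre_iff (ord : List Char) (ps : List (String × String)) :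
    (∀ k < ps.length,
        pvSafe ord (ps.getD k ("", "")) = true ∨
        ∃ i < k, pvDecF ord (ps.getD i ("", "")) = true)
      ↔ pvPreP ord ps := by
  induction ps with
  | nil => simp [pvPreP]
  | cons p ps ih =>
    constructor
    · intro h
      have hS : pvSafe ord p = true := by
        rcases h 0 (by simp) with h0 | ⟨i, hi, -⟩
        · simpa using h0
        · omega
      refine ⟨hS, ?_⟩
      by_cases hFp : pvDecF ord p = true
      · exact Or.inl hFp
      · refine Or.inr (ih.mp ?_)
        intro k hk
        rcases h (k + 1) (by simpa using Nat.succ_lt_succ hk) with h0 | ⟨i, hi, hFi⟩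
        · exact Or.inl (by simpa using h0)
        · cases i with
          | zero => exact absurd (by simpa using hFi) hFp
          | succ i' => exact Or.inr ⟨i', by omega, by simpa using hFi⟩
    · rintro ⟨hS, hrest⟩ k hk
      cases k with
      | zero => exact Or.inl (by simpa using hS)
      | succ k' =>
        rcases hrest with hFp | hPre
        · exact Or.inr ⟨0, by omega, by simpa using hFp⟩
        · rcases ih.mpr hPre k' (by simpa using Nat.lt_of_succ_lt_succ hk) with h0 | ⟨i, hi, hFi⟩
          · exact Or.inl (by simpa using h0)
          · exact Or.inr ⟨i + 1, by omega, by simpa using hFi⟩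

-- A's outer loop steps: a pair whose check is True is skipped, one whose check is False stops it.
theorem pvLoopA_cons_true (d : PySem.Dict Char Int) (a b : String) (ps : List (String × String))
    (h : (if a.toList.length > b.toList.length && (a.toList.take b.toList.length == b.toList) then false
          else pvInnerA d (a.toList.zip b.toList)) = true) :
    pvLoopA d ((a, b) :: ps) = pvLoopA d ps := by
  rw [pvLoopA]
  split_ifs with h1 h2
  · rw [if_pos h1] at h
    exact absurd h (by simp)
  · rfl
  · rw [if_neg h1] at h
    exact absurd h h2

theorem pvLoopA_cons_false (d : PySem.Dict Char Int) (a b : String) (ps : List (String × String))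
    (h : (if a.toList.length > b.toList.length && (a.toList.take b.toList.length == b.toList) then false
          else pvInnerA d (a.toList.zip b.toList)) = false) :
    pvLoopA d ((a, b) :: ps) = false := by
  rw [pvLoopA]
  split_ifs with h1 h2
  · rfl
  · rw [if_neg h1] at h
    rw [h] at h2
    exact absurd h2 (by simp)
  · rfl

-- A's outer loop decides the adjacent-pairs (IsChain) property of the keys, given the invariant.
theorem pvLoop_iff (order : String) (n : Int) (words : List String)
    (h : pvPreP order.toList (words.zip words.tail)) :
    (pvLoopA (pvInd order) (words.zip words.tail) = true)
      ↔ List.IsChain (fun a b => pvKeyB (pvInd order) n a ≤ pvKeyB (pvInd order) n b) words := by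
  induction words with
  | nil => simp [pvLoopA]
  | cons a rest ih =>
    cases rest with
    | nil => simp [pvLoopA]
    | cons b rest' =>
      rw [List.tail_cons, List.zip_cons_cons] at h ⊢
      obtain ⟨hS, hrest⟩ := h
      rw [List.isChain_cons_cons]
      rcases hrest with hF | hPre
      · -- this pair is decided False: both sides are False
        have hd := pvPair_decF order n a.toList b.toList hF
        have hfalse := pvLoopA_cons_false (pvInd order) a b ((b :: rest').zip rest') hd.1
        constructor
        · intro hL
          rw [hfalse] at hL
          exact absurd hL (by simp)
        · rintro ⟨hRB, -⟩
          exact absurd hRB hd.2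
      · -- this pair is safe and not known False: its check is the key comparison
        have hpair := pvPair_safe order n a.toList b.toList hS
        have hih := ih hPre
        simp only [List.tail_cons] at hih
        by_cases hc : (if a.toList.length > b.toList.length && (a.toList.take b.toList.length == b.toList) then false
            else pvInnerA (pvInd order) (a.toList.zip b.toList)) = true
        · have hRB := hpair.mp hc
          rw [pvLoopA_cons_true (pvInd order) a b ((b :: rest').zip rest') hc, hih]
          exact ⟨fun hL => ⟨hRB, hL⟩, fun hL => hL.2⟩
        · have hRB : ¬ (pvKeyB (pvInd order) n a ≤ pvKeyB (pvInd order) n b) :=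
            fun hle => hc (hpair.mpr hle)
          have hfalse := pvLoopA_cons_false (pvInd order) a b ((b :: rest').zip rest')
            ((Bool.not_eq_true _).mp hc)
          constructor
          · intro hL
            rw [hfalse] at hL
            exact absurd hL (by simp)
          · rintro ⟨hrb, -⟩
            exact absurd hrb hRB

-- B's 'keys == sorted(keys)' decides pairwise sortedness of the key lists.
theorem pvSortedSelf_iff_pairwise (keys : List (List Int)) :
    ((keys == @PySem.List.sorted (List Int) (List Int) List.instLinearOrder.toLT
        LinearOrder.toDecidableLT keys (fun x => x) false) = true)
      ↔ keys.Pairwise (· ≤ ·) := by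
  rw [beq_iff_eq]
  constructor
  · intro he
    have hp := PySem.List.sorted_pairwise (xs := keys) (key := fun x => x)
    rw [← he] at hp
    simpa using hp
  · intro h
    exact (PySem.List.sorted_eq_self_of_pairwise (xs := keys) (key := fun x => x)
      (by simpa using h)).symm

-- ===== VERDICT (by name: the statement is the Claim_ definition above) =====
theorem P953_isAlienSorted_spec : Claim_equal_P953_isAlienSorted := by
  intro words order _hdom hpre
  unfold Spec_P953_isAlienSorted P953_isAlienSorted P953_isAlienSorted_alt
  simp only
  have hP : pvPreP order.toList (words.zip words.tail) :=
    (pvPre_iff order.toList (words.zip words.tail)).mp hpre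
  have hA := pvLoop_iff order (order.toList.length : Int) words hP
  have hB := pvSortedSelf_iff_pairwise (words.map (pvKeyB (pvInd order) (order.toList.length : Int)))
  haveI : Trans (fun a b => pvKeyB (pvInd order) (order.toList.length : Int) a ≤ pvKeyB (pvInd order) (order.toList.length : Int) b)
      (fun a b => pvKeyB (pvInd order) (order.toList.length : Int) a ≤ pvKeyB (pvInd order) (order.toList.length : Int) b)
      (fun a b => pvKeyB (pvInd order) (order.toList.length : Int) a ≤ pvKeyB (pvInd order) (order.toList.length : Int) b) :=
    ⟨fun h1 h2 => le_trans h1 h2⟩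
  have hchain : List.IsChain (fun a b => pvKeyB (pvInd order) (order.toList.length : Int) a ≤ pvKeyB (pvInd order) (order.toList.length : Int) b) words
      ↔ (words.map (pvKeyB (pvInd order) (order.toList.length : Int))).Pairwise (· ≤ ·) := by
    rw [List.isChain_iff_pairwise, List.pairwise_map]
  have hiff : pvLoopA (pvInd order) (words.zip words.tail) = true
      ↔ ((words.map (pvKeyB (pvInd order) (order.toList.length : Int)) == @PySem.List.sorted (List Int) (List Int) List.instLinearOrder.toLT
            LinearOrder.toDecidableLT (words.map (pvKeyB (pvInd order) (order.toList.length : Int))) (fun x => x) false) = true) := by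
    rw [hA, hB, hchain]
  cases hx : pvLoopA (pvInd order) (words.zip words.tail) <;>
    cases hy : (words.map (pvKeyB (pvInd order) (order.toList.length : Int)) == @PySem.List.sorted (List Int) (List Int) List.instLinearOrder.toLT
        LinearOrder.toDecidableLT (words.map (pvKeyB (pvInd order) (order.toList.length : Int))) (fun x => x) false) <;>
      simp_all
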